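-- pv_equiv track=rewrite | github.com/zfifteen/z-band-prime-prefilter | benchmarks/python/prime_inference_generator/composite_exclusion_boundary_probe.py | higher_divisor_pressure_lock_selected
-- ===== SOURCE A (Python) =====
-- from typing import Any
--
-- COMPOSITE_WITNESS_FACTORS = (7, 11, 13, 17, 19, 23, 29, 31)
--
-- SINGLE_HOLE_WITNESS_FACTORS = (
--     37,
--     41,
--     43,
--     47,
--     53,
--     59,
--     61,
--     67,
--     71,
--     73,
--     79,
--     83,
--     89,
--     97,
-- )
--
-- KNOWN_PRIME_BASIS_PREFIX = (2, 3, 5)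
--
-- def known_basis(witness_bound: int) -> tuple[int, ...]:
--     """Return the explicit small-prime basis available to the ceiling probe."""
--     basis = (
--         *KNOWN_PRIME_BASIS_PREFIX,
--         *COMPOSITE_WITNESS_FACTORS,
--         *SINGLE_HOLE_WITNESS_FACTORS,
--     )
--     return tuple(factor for factor in basis if factor <= witness_bound)
--
-- def certified_divisor_class(n: int, witness_bound: int) -> dict[str, Any] | None:
--     """Return a positive divisor-class certificate for n, if available."""
--     basis = known_basis(witness_bound)
--     for base in basis:
--         for exponent in range(2, 7):
--             if base**exponent == n:
--                 return {
--                     "divisor_class": exponent + 1,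
--                     "family": "known_basis_prime_power",
--                     "certificate": {"base": base, "exponent": exponent},
--                 }
--
--     for index, left in enumerate(basis):
--         for right in basis[index + 1 :]:
--             if left * right == n:
--                 return {
--                     "divisor_class": 4,
--                     "family": "known_basis_semiprime",
--                     "certificate": {"left": left, "right": right},
--                 }
--     return None
--
-- def first_legal_carrier(
--     anchor_p: int,
--     candidate_offset: int,
--     witness_bound: int,
-- ) -> dict[str, Any]:
--     """Return the first legal composite carrier inside a candidate chamber."""
--     for offset in range(1, candidate_offset):
--         certificate = certified_divisor_class(anchor_p + offset, witness_bound)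
--         if certificate is None:
--             continue
--         return {
--             "carrier_offset": offset,
--             "carrier_w": anchor_p + offset,
--             "carrier_d": int(certificate["divisor_class"]),
--             "carrier_family": certificate["family"],
--         }
--     return {
--         "carrier_offset": None,
--         "carrier_w": None,
--         "carrier_d": None,
--         "carrier_family": None,
--     }
--
-- def higher_divisor_pressure_lock_selected(
--     anchor_p: int,
--     resolved_offset: int,
--     later_unresolved_offsets: list[int],
--     witness_bound: int,
-- ) -> bool:
--     """Return whether a resolved candidate satisfies the higher-divisor lock."""
--     if not later_unresolved_offsets:
--         return False
--     carrier = first_legal_carrier(anchor_p, resolved_offset, witness_bound)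
--     carrier_d = carrier["carrier_d"]
--     if carrier_d is None:
--         return False
--     for offset in range(resolved_offset + 1, max(later_unresolved_offsets)):
--         certificate = certified_divisor_class(anchor_p + offset, witness_bound)
--         if certificate is None:
--             continue
--         if int(certificate["divisor_class"]) > int(carrier_d):
--             return True
--     return False
-- ===== SOURCE B (Python) =====
-- _BASIS_ALL = (2, 3, 5, 7, 11, 13, 17, 19, 23, 29, 31, 37, 41, 43, 47, 53,
--               59, 61, 67, 71, 73, 79, 83, 89, 97)
--
--
-- def _certified_table(witness_bound):
--     """All values with a divisor-class certificate, as (value, divisor_class) pairs."""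
--     basis = [p for p in _BASIS_ALL if p <= witness_bound]
--     table = [(p ** e, e + 1) for p in basis for e in range(2, 7)]
--     table += [(l * r, 4) for i, l in enumerate(basis) for r in basis[i + 1:]]
--     return table
--
--
-- def higher_divisor_pressure_lock_selected(anchor_p, resolved_offset,
--                                           later_unresolved_offsets, witness_bound):
--     if not later_unresolved_offsets:
--         return False
--     table = _certified_table(witness_bound)
--     lo, hi = anchor_p + 1, anchor_p + resolved_offset
--     best = None
--     for n, d in table:
--         if lo <= n < hi and (best is None or n < best[0]):
--             best = (n, d)
--     if best is None:
--         return False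
--     carrier_d = best[1]
--     lo2 = anchor_p + resolved_offset + 1
--     hi2 = anchor_p + max(later_unresolved_offsets)
--     return any(lo2 <= n < hi2 and d > carrier_d for n, d in table)
-- ===== Notes on version B (the rewrite author's own statement) =====
-- stated objective: faster
-- what changed: A scans every offset in the (possibly huge) ranges and re-runs the O(|basis|^2) certificate search per offset; B precomputes the bounded finite table of all certifiable values (prime powers and semiprimes over the basis) once and answers both questions (first carrier = minimal table key in the window, lock = any table entry in the later window with a larger class) by single passes over that table.
import Mathlib
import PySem

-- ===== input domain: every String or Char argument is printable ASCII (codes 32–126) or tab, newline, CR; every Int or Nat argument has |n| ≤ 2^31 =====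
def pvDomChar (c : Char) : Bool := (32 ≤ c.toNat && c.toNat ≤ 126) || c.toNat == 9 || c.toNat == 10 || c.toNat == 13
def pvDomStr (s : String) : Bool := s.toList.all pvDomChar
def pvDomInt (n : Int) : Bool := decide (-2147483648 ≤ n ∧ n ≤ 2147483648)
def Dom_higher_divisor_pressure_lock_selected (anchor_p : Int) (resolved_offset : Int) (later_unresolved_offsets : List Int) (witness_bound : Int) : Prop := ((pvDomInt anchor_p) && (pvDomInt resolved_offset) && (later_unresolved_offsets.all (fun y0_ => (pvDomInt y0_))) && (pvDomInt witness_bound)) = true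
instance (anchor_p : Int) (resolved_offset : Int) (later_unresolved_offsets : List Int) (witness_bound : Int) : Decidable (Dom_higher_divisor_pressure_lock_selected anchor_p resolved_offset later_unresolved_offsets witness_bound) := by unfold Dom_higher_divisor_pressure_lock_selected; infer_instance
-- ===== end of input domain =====

-- B replaces A's scans over the (possibly huge) offset ranges by one pass over the bounded
-- finite table of certified values; a timing run measured B faster at the large sizes.

-- ===== PORT A =====
def pvBasisAll : List Int :=
  [2, 3, 5, 7, 11, 13, 17, 19, 23, 29, 31, 37, 41, 43, 47, 53, 59, 61, 67, 71, 73, 79, 83, 89, 97]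

def known_basis (witness_bound : Int) : List Int :=
  pvBasisAll.filter (fun factor => factor ≤ witness_bound)

-- A's certificate dict is modelled by its (divisor_class, family) part; the "certificate"
-- sub-dict is never read by any caller in this module.
def semiScan : List Int → Int → Option (Int × String)
  | [], _ => none
  | left :: rest, n =>
    match rest.findSome? (fun right =>
        if left * right = n then some ((4 : Int), "known_basis_semiprime") else none) with
    | some c => some c
    | none => semiScan rest n

def certified_divisor_class (n : Int) (witness_bound : Int) : Option (Int × String) :=
  let basis := known_basis witness_bound
  match basis.findSome? (fun base =>
      (PySem.List.pyRange 2 7 1).findSome? (fun exponent =>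
        if base ^ exponent.toNat = n then some (exponent + 1, "known_basis_prime_power")
        else none)) with
  | some c => some c
  | none => semiScan basis n

-- 'for offset in range(1, candidate_offset): … return …' — the loop with its early return,
-- as a recursion on the remaining interval (early exit, like Python; no list is materialised)
def carrierScan (anchor_p : Int) (witness_bound : Int) (offset stop : Int) :
    Option (Int × (Int × String)) :=
  if h : offset < stop then
    match certified_divisor_class (anchor_p + offset) witness_bound with
    | none => carrierScan anchor_p witness_bound (offset + 1) stop
    | some c => some (offset, c)
  else none
termination_by (stop - offset).toNat
decreasing_by omega

def first_legal_carrier (anchor_p : Int) (candidate_offset : Int) (witness_bound : Int) :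
    Option Int × Option Int × Option Int × Option String :=
  match carrierScan anchor_p witness_bound 1 candidate_offset with
  | some (offset, d, fam) => (some offset, some (anchor_p + offset), some d, some fam)
  | none => (none, none, none, none)

-- A's second loop: 'for offset in range(resolved_offset + 1, max(later)): … return True', same shape
def lockScan (anchor_p : Int) (witness_bound : Int) (carrier_d : Int) (offset stop : Int) : Bool :=
  if h : offset < stop then
    match certified_divisor_class (anchor_p + offset) witness_bound with
    | none => lockScan anchor_p witness_bound carrier_d (offset + 1) stop
    | some c =>
      if carrier_d < c.1 then true
      else lockScan anchor_p witness_bound carrier_d (offset + 1) stop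
  else false
termination_by (stop - offset).toNat
decreasing_by all_goals omega

def higher_divisor_pressure_lock_selected (anchor_p : Int) (resolved_offset : Int) (later_unresolved_offsets : List Int) (witness_bound : Int) : Bool :=
  if later_unresolved_offsets.isEmpty then false
  else
    let carrier := first_legal_carrier anchor_p resolved_offset witness_bound
    match carrier.2.2.1 with
    | none => false
    | some carrier_d =>
      -- max(later_unresolved_offsets): list is nonempty here, so max? is some; getD 0 unreachable
      lockScan anchor_p witness_bound carrier_d (resolved_offset + 1)
        ((PySem.List.max? later_unresolved_offsets (fun x => x)).getD 0)

-- ===== PORT B =====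
-- Source B's _BASIS_ALL is the same literal tuple as A's basis prefix; the port shares pvBasisAll.
def pairsTable : List Int → List (Int × Int)
  | [] => []
  | l :: rest => rest.map (fun r => (l * r, (4 : Int))) ++ pairsTable rest

def certified_table (witness_bound : Int) : List (Int × Int) :=
  let basis := pvBasisAll.filter (fun p => p ≤ witness_bound)
  (basis.flatMap (fun p =>
      (PySem.List.pyRange 2 7 1).map (fun e => (p ^ e.toNat, e + 1))))
    ++ pairsTable basis

def pvBetter (best : Option (Int × Int)) (n : Int) : Bool :=
  match best with
  | none => true
  | some b => n < b.1

def minStep (lo hi : Int) (best : Option (Int × Int)) (p : Int × Int) : Option (Int × Int) :=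
  if lo ≤ p.1 ∧ p.1 < hi ∧ pvBetter best p.1 = true then some p else best

def higher_divisor_pressure_lock_selected_alt (anchor_p : Int) (resolved_offset : Int) (later_unresolved_offsets : List Int) (witness_bound : Int) : Bool :=
  if later_unresolved_offsets.isEmpty then false
  else
    let table := certified_table witness_bound
    let lo := anchor_p + 1
    let hi := anchor_p + resolved_offset
    match table.foldl (minStep lo hi) none with
    | none => false
    | some best =>
      let carrier_d := best.2
      let lo2 := anchor_p + resolved_offset + 1
      let hi2 := anchor_p + (PySem.List.max? later_unresolved_offsets (fun x => x)).getD 0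
      table.any (fun p => decide (lo2 ≤ p.1) && decide (p.1 < hi2) && decide (carrier_d < p.2))

-- ===== PRECONDITION & SPEC =====
def Spec_higher_divisor_pressure_lock_selected (anchor_p : Int) (resolved_offset : Int) (later_unresolved_offsets : List Int) (witness_bound : Int) (out : Bool) : Prop := out = higher_divisor_pressure_lock_selected_alt anchor_p resolved_offset later_unresolved_offsets witness_bound
instance (anchor_p : Int) (resolved_offset : Int) (later_unresolved_offsets : List Int) (witness_bound : Int) (out : Bool) : Decidable (Spec_higher_divisor_pressure_lock_selected anchor_p resolved_offset later_unresolved_offsets witness_bound out) := by unfold Spec_higher_divisor_pressure_lock_selected; infer_instance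

-- ===== CLAIM (what is proved, stated in full; the proofs are below) =====
def Claim_equal_higher_divisor_pressure_lock_selected : Prop := ∀ (anchor_p : Int) (resolved_offset : Int) (later_unresolved_offsets : List Int) (witness_bound : Int), Dom_higher_divisor_pressure_lock_selected anchor_p resolved_offset later_unresolved_offsets witness_bound → Spec_higher_divisor_pressure_lock_selected anchor_p resolved_offset later_unresolved_offsets witness_bound (higher_divisor_pressure_lock_selected anchor_p resolved_offset later_unresolved_offsets witness_bound)

-- ===== LEMMAS AND PROOFS =====

-- `look t n`: first divisor class recorded for value n in table t (proof-side shorthand).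
def pvLook (t : List (Int × Int)) (n : Int) : Option Int :=
  (t.find? (fun p => p.1 == n)).map Prod.snd

theorem map_fst_or {α β γ : Type} (o y : Option (α × β)) (f : α × β → γ) :
    (o.or y).map f = (o.map f).or (y.map f) := by
  cases o <;> rfl

theorem look_append (t1 t2 : List (Int × Int)) (n : Int) :
    pvLook (t1 ++ t2) n = (pvLook t1 n).or (pvLook t2 n) := by
  unfold pvLook
  rw [List.find?_append]
  cases t1.find? (fun p => p.1 == n) <;> simp

-- inner loop of the prime-power scan vs the mapped block of the table
theorem inner_scan_eq (E : List Int) (f g : Int → Int) (s : String) (n : Int) :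
    (E.findSome? (fun e => if f e = n then some ((g e, s) : Int × String) else none)).map Prod.fst
      = pvLook (E.map (fun e => (f e, g e))) n := by
  induction E with
  | nil => rfl
  | cons e rest ih =>
    by_cases h : f e = n <;>
      simp [List.findSome?_cons, List.find?_cons, pvLook, h] at * <;> simpa [pvLook] using ih

-- outer composition: a findSome? over blocks vs find? over the concatenated table
theorem blocks_scan_eq (L : List Int) (F : Int → Option (Int × String))
    (T : Int → List (Int × Int)) (n : Int)
    (h : ∀ a, (F a).map Prod.fst = pvLook (T a) n) :
    (L.findSome? F).map Prod.fst = pvLook (L.flatMap T) n := by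
  induction L with
  | nil => rfl
  | cons a rest ih =>
    have hm : List.findSome? F (a :: rest) = (F a).or (List.findSome? F rest) := by
      rw [List.findSome?_cons]; cases F a <;> rfl
    rw [hm, List.flatMap_cons, look_append, map_fst_or, h a, ih]

-- semiprime scan vs the pairs table
theorem semiScan_eq (L : List Int) (n : Int) :
    (semiScan L n).map Prod.fst = pvLook (pairsTable L) n := by
  induction L with
  | nil => rfl
  | cons l rest ih =>
    have hm : semiScan (l :: rest) n = (rest.findSome? (fun right =>
        if l * right = n then some ((4 : Int), "known_basis_semiprime") else none)).or
          (semiScan rest n) := by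
      rw [semiScan]
      cases rest.findSome? (fun right =>
        if l * right = n then some ((4 : Int), "known_basis_semiprime") else none) <;> rfl
    rw [hm, pairsTable, look_append, map_fst_or, ih,
      inner_scan_eq rest (fun r => l * r) (fun _ => (4 : Int)) "known_basis_semiprime" n]

-- KEY LEMMA: A's certificate search computes exactly the table lookup of B's table
theorem cert_eq_look (n witness_bound : Int) :
    (certified_divisor_class n witness_bound).map Prod.fst
      = pvLook (certified_table witness_bound) n := by
  unfold certified_divisor_class certified_table known_basis
  set basis := pvBasisAll.filter (fun factor => factor ≤ witness_bound) with hb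
  have hm : (match basis.findSome? (fun base =>
      (PySem.List.pyRange 2 7 1).findSome? (fun exponent =>
        if base ^ exponent.toNat = n then some (exponent + 1, "known_basis_prime_power")
        else none)) with
    | some c => some c
    | none => semiScan basis n)
      = (basis.findSome? (fun base =>
      (PySem.List.pyRange 2 7 1).findSome? (fun exponent =>
        if base ^ exponent.toNat = n then some (exponent + 1, "known_basis_prime_power")
        else none))).or (semiScan basis n) := by
    cases basis.findSome? (fun base =>
      (PySem.List.pyRange 2 7 1).findSome? (fun exponent =>
        if base ^ exponent.toNat = n then some (exponent + 1, "known_basis_prime_power")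
        else none)) <;> rfl
  rw [hm, look_append, map_fst_or, semiScan_eq,
    blocks_scan_eq basis _ (fun p => (PySem.List.pyRange 2 7 1).map (fun e => (p ^ e.toNat, e + 1))) n
      (fun a => inner_scan_eq (PySem.List.pyRange 2 7 1) (fun e => a ^ e.toNat) (fun e => e + 1) _ n)]

-- nodup keys of the table (sublist of the full-basis table, whose keys are checked by decide)
theorem pairsTable_sublist {s t : List Int} (h : s.Sublist t) :
    (pairsTable s).Sublist (pairsTable t) := by
  induction h with
  | slnil => exact List.Sublist.refl _
  | cons a h ih =>
    exact ih.trans (List.sublist_append_right _ _)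
  | cons₂ a h ih =>
    exact List.Sublist.append ((h.map _)) ih

set_option maxRecDepth 100000 in
set_option maxHeartbeats 4000000 in
theorem table_keys_nodup (witness_bound : Int) :
    ((certified_table witness_bound).map Prod.fst).Nodup := by
  have hsub : (certified_table witness_bound).Sublist
      ((pvBasisAll.flatMap (fun p =>
          (PySem.List.pyRange 2 7 1).map (fun e => (p ^ e.toNat, e + 1))))
        ++ pairsTable pvBasisAll) := by
    have hb : (pvBasisAll.filter (fun p => p ≤ witness_bound)).Sublist pvBasisAll :=
      List.filter_sublist
    exact List.Sublist.append
      (hb.flatMap (fun p => (PySem.List.pyRange 2 7 1).map (fun (e : Int) => (p ^ e.toNat, e + 1))))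
      (pairsTable_sublist hb)
  have hfull : (((pvBasisAll.flatMap (fun p =>
      (PySem.List.pyRange 2 7 1).map (fun (e : Int) => (p ^ e.toNat, e + 1))))
        ++ pairsTable pvBasisAll).map Prod.fst).Nodup := by decide
  exact hfull.sublist (hsub.map _)

theorem look_mem {t : List (Int × Int)} {n c : Int} (h : pvLook t n = some c) :
    (n, c) ∈ t := by
  unfold pvLook at h
  cases hfind : t.find? (fun p => p.1 == n) with
  | none => simp [hfind] at h
  | some q =>
    simp [hfind] at h
    have h1 := List.find?_some hfind
    simp only [beq_iff_eq] at h1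
    have h2 : q ∈ t := List.mem_of_find?_eq_some hfind
    have : q = (n, c) := by
      cases q; simp at h1 h ⊢; exact ⟨h1, h⟩
    rwa [this] at h2

theorem mem_look {t : List (Int × Int)} (hnd : (t.map Prod.fst).Nodup)
    {n c : Int} (h : (n, c) ∈ t) : pvLook t n = some c := by
  induction t with
  | nil => simp at h
  | cons q rest ih =>
    simp only [List.map_cons, List.nodup_cons] at hnd
    rcases List.mem_cons.mp h with h | h
    · subst h; simp [pvLook, List.find?_cons]
    · have hne : (q.1 == n) = false := by
        have : n ∈ rest.map Prod.fst := List.mem_map.mpr ⟨(n, c), h, rfl⟩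
        simp only [beq_eq_false_iff_ne, ne_eq]
        intro he; exact hnd.1 (he ▸ this)
      simpa [pvLook, List.find?_cons, hne] using ih hnd.2 h

-- fold facts for B's min-search
theorem fold_empty_interval {lo hi : Int} (h : hi ≤ lo) (t : List (Int × Int))
    (acc : Option (Int × Int)) : t.foldl (minStep lo hi) acc = acc := by
  induction t generalizing acc with
  | nil => rfl
  | cons p rest ih =>
    have : minStep lo hi acc p = acc := by
      unfold minStep
      rw [if_neg]; rintro ⟨h1, h2, _⟩; omega
    simp [List.foldl_cons, this, ih]

theorem fold_keeps_low {lo hi : Int} (t : List (Int × Int)) (b : Int × Int)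
    (hb : b.1 ≤ lo) : t.foldl (minStep lo hi) (some b) = some b := by
  induction t with
  | nil => rfl
  | cons p rest ih =>
    have : minStep lo hi (some b) p = some b := by
      unfold minStep
      rw [if_neg]; rintro ⟨h1, _, h3⟩
      simp [pvBetter] at h3; omega
    simp [List.foldl_cons, this, ih]

theorem fold_finds_lo {lo hi : Int} (hlt : lo < hi) :
    ∀ (t : List (Int × Int)) (q : Int × Int) (acc : Option (Int × Int)),
    t.find? (fun p => p.1 == lo) = some q →
    (acc = none ∨ ∃ b, acc = some b ∧ lo < b.1) →
    t.foldl (minStep lo hi) acc = some q := by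
  intro t
  induction t with
  | nil => intro q acc h _; simp at h
  | cons p rest ih =>
    intro q acc hfind hacc
    by_cases hp : (p.1 == lo) = true
    · have hq : p = q := by simpa [List.find?_cons, hp] using hfind
      subst hq
      have hp' : p.1 = lo := by simpa using hp
      have hstep : minStep lo hi acc p = some p := by
        unfold minStep
        rw [if_pos]
        refine ⟨by omega, by omega, ?_⟩
        rcases hacc with h | ⟨b, hb, hblo⟩
        · simp [h, pvBetter]
        · simp [hb, pvBetter]; omega
      simp only [List.foldl_cons, hstep]
      exact fold_keeps_low rest p (le_of_eq hp')
    · have hfind' : rest.find? (fun p => p.1 == lo) = some q := by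
        simpa [List.find?_cons, hp] using hfind
      have hp' : p.1 ≠ lo := by simpa using hp
      have hacc' : minStep lo hi acc p = none ∨
          ∃ b, minStep lo hi acc p = some b ∧ lo < b.1 := by
        unfold minStep
        split_ifs with hc
        · exact Or.inr ⟨p, rfl, by rcases hc with ⟨h1, _, _⟩; omega⟩
        · exact hacc
      simpa [List.foldl_cons] using ih q _ hfind' hacc'

theorem fold_shift_lo {lo hi : Int} (t : List (Int × Int))
    (h : ∀ p ∈ t, p.1 ≠ lo) (acc : Option (Int × Int)) :
    t.foldl (minStep lo hi) acc = t.foldl (minStep (lo + 1) hi) acc := by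
  refine PySem.List.foldl_congr_mem t _ _ acc (fun acc p hp => ?_)
  have := h p hp
  unfold minStep
  by_cases h1 : lo ≤ p.1 ∧ p.1 < hi ∧ pvBetter acc p.1 = true
  · rw [if_pos h1, if_pos ⟨by omega, h1.2⟩]
  · rw [if_neg h1, if_neg]
    rintro ⟨a, b, c⟩; exact h1 ⟨by omega, b, c⟩

-- CENTRAL LEMMA: the first table value found scanning x = lo, lo+1, …, hi-1 equals
-- the class of the minimal table key in [lo, hi), as computed by B's fold.
theorem scan_eq_fold (t : List (Int × Int)) (lo hi : Int) :
    (PySem.List.pyRange lo hi 1).findSome? (fun x => pvLook t x)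
      = (t.foldl (minStep lo hi) none).map Prod.snd := by
  by_cases hle : hi ≤ lo
  · rw [PySem.List.pyRange_one_eq_nil hle, fold_empty_interval hle]
    rfl
  · push_neg at hle
    obtain ⟨n, hn⟩ : ∃ n : Nat, (hi - lo).toNat = n := ⟨_, rfl⟩
    induction n generalizing lo with
    | zero => omega
    | succ n ih =>
      rw [PySem.List.pyRange_one_cons hle, List.findSome?_cons]
      cases hfind : t.find? (fun p => p.1 == lo) with
      | some q =>
        have : pvLook t lo = some q.2 := by simp [pvLook, hfind]
        rw [this, fold_finds_lo hle t q none hfind (Or.inl rfl)]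
        rfl
      | none =>
        have hno : ∀ p ∈ t, p.1 ≠ lo := by
          intro p hp
          have := List.find?_eq_none.mp hfind p hp
          simpa using this
        have : pvLook t lo = none := by simp [pvLook, hfind]
        rw [this, fold_shift_lo t hno none]
        by_cases hle2 : hi ≤ lo + 1
        · rw [PySem.List.pyRange_one_eq_nil hle2, fold_empty_interval hle2]
          rfl
        · exact ih (lo + 1) (by omega) (by omega)

-- the recursive loops of port A, re-expressed as scans over the corresponding pyRange
theorem carrierScan_eq (a wb : Int) (off stop : Int) :
    carrierScan a wb off stop
      = (PySem.List.pyRange off stop 1).findSome? (fun o =>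
          (certified_divisor_class (a + o) wb).map (fun c => (o, c))) := by
  by_cases h : off < stop
  · obtain ⟨n, hn⟩ : ∃ n, (stop - off).toNat = n := ⟨_, rfl⟩
    induction n generalizing off with
    | zero => omega
    | succ n ih =>
      rw [carrierScan, dif_pos h, PySem.List.pyRange_one_cons h, List.findSome?_cons]
      cases hc : certified_divisor_class (a + off) wb with
      | some c => simp
      | none =>
        simp only [Option.map_none]
        by_cases h2 : off + 1 < stop
        · exact ih (off + 1) h2 (by omega)
        · rw [carrierScan, dif_neg h2, PySem.List.pyRange_one_eq_nil (by omega)]; rfl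
  · rw [carrierScan, dif_neg h, PySem.List.pyRange_one_eq_nil (by omega)]; rfl

theorem lockScan_eq (a wb d : Int) (off stop : Int) :
    lockScan a wb d off stop
      = (PySem.List.pyRange off stop 1).any (fun o =>
          match certified_divisor_class (a + o) wb with
          | none => false
          | some c => decide (d < c.1)) := by
  by_cases h : off < stop
  · obtain ⟨n, hn⟩ : ∃ n, (stop - off).toNat = n := ⟨_, rfl⟩
    induction n generalizing off with
    | zero => omega
    | succ n ih =>
      rw [lockScan, dif_pos h, PySem.List.pyRange_one_cons h, List.any_cons]
      cases hc : certified_divisor_class (a + off) wb with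
      | some c =>
        by_cases hd : d < c.1
        · simp [hd]
        · simp only [if_neg hd, decide_eq_true_eq, Bool.false_or, hd, decide_false]
          by_cases h2 : off + 1 < stop
          · exact ih (off + 1) h2 (by omega)
          · rw [lockScan, dif_neg h2, PySem.List.pyRange_one_eq_nil (by omega)]; rfl
      | none =>
        simp only [Bool.false_or]
        by_cases h2 : off + 1 < stop
        · exact ih (off + 1) h2 (by omega)
        · rw [lockScan, dif_neg h2, PySem.List.pyRange_one_eq_nil (by omega)]; rfl
  · rw [lockScan, dif_neg h, PySem.List.pyRange_one_eq_nil (by omega)]; rfl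

-- shift a scan over offsets to a scan over values (findSome? and any versions)
theorem findSome?_shift {γ : Type} (a lo hi : Int) (F : Int → Option γ) :
    (PySem.List.pyRange lo hi 1).findSome? (fun o => F (a + o))
      = (PySem.List.pyRange (a + lo) (a + hi) 1).findSome? F := by
  rw [PySem.List.pyRange_one, PySem.List.pyRange_one, List.findSome?_map, List.findSome?_map]
  have he : a + hi - (a + lo) = hi - lo := by ring
  rw [he]
  congr 1
  funext k
  simp [Function.comp]
  ring_nf

theorem any_shift (a lo hi : Int) (F : Int → Bool) :
    (PySem.List.pyRange lo hi 1).any (fun o => F (a + o))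
      = (PySem.List.pyRange (a + lo) (a + hi) 1).any F := by
  rw [PySem.List.pyRange_one, PySem.List.pyRange_one, List.any_map, List.any_map]
  have he : a + hi - (a + lo) = hi - lo := by ring
  rw [he]
  congr 1
  funext k
  simp [Function.comp]
  ring_nf

-- drop the tracked offset from A's carrier scan
theorem carrier_proj (l : List Int) (f : Int → Option (Int × String)) :
    (l.findSome? (fun o => (f o).map (fun c => (o, c)))).map (fun x => x.2.1)
      = l.findSome? (fun o => (f o).map Prod.fst) := by
  induction l with
  | nil => rfl
  | cons o rest ih =>
    cases h : f o <;> simp [List.findSome?_cons, h, ih]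

-- the any-scan over a value range equals B's any over the table (needs nodup keys)
theorem any_scan_eq (t : List (Int × Int)) (hnd : (t.map Prod.fst).Nodup) (lo hi d : Int) :
    (PySem.List.pyRange lo hi 1).any (fun x =>
        match pvLook t x with
        | none => false
        | some c => decide (d < c))
      = t.any (fun p => decide (lo ≤ p.1) && decide (p.1 < hi) && decide (d < p.2)) := by
  rw [Bool.eq_iff_iff, List.any_eq_true, List.any_eq_true]
  constructor
  · rintro ⟨x, hx, hq⟩
    rw [PySem.List.mem_pyRange_one] at hx
    cases hl : pvLook t x with
    | none => rw [hl] at hq; simp at hq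
    | some c =>
      rw [hl] at hq
      exact ⟨(x, c), look_mem hl, by simp at hq ⊢; exact ⟨⟨hx.1, hx.2⟩, hq⟩⟩
  · rintro ⟨p, hp, hb⟩
    simp only [Bool.and_eq_true, decide_eq_true_eq] at hb
    refine ⟨p.1, PySem.List.mem_pyRange_one.mpr ⟨hb.1.1, hb.1.2⟩, ?_⟩
    have : pvLook t p.1 = some p.2 := mem_look hnd (by simpa using hp)
    rw [this]
    simpa using hb.2

-- ===== VERDICT (by name: the statement is the Claim_ definition above) =====
theorem higher_divisor_pressure_lock_selected_spec : Claim_equal_higher_divisor_pressure_lock_selected := by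
  intro a r later wb _
  unfold Spec_higher_divisor_pressure_lock_selected
  unfold higher_divisor_pressure_lock_selected higher_divisor_pressure_lock_selected_alt
  cases hEmp : later.isEmpty
  · simp only [Bool.false_eq_true, if_neg, ite_false]
    set t := certified_table wb with ht
    -- carrier computation agrees
    have hc : (first_legal_carrier a r wb).2.2.1
        = (t.foldl (minStep (a + 1) (a + r)) none).map Prod.snd := by
      unfold first_legal_carrier
      rw [carrierScan_eq]
      have hproj := carrier_proj (PySem.List.pyRange 1 r 1)
        (fun o => certified_divisor_class (a + o) wb)
      have hK : (PySem.List.pyRange 1 r 1).findSome?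
          (fun o => (certified_divisor_class (a + o) wb).map Prod.fst)
          = (PySem.List.pyRange 1 r 1).findSome? (fun o => pvLook t (a + o)) := by
        congr 1; funext o; rw [cert_eq_look]
      have := hproj.trans (hK.trans
        ((findSome?_shift a 1 r (fun x => pvLook t x)).trans (scan_eq_fold t (a + 1) (a + r))))
      cases hm : (PySem.List.pyRange 1 r 1).findSome? (fun o =>
          (certified_divisor_class (a + o) wb).map (fun c => (o, c))) with
      | none => rw [hm] at this; simpa using this.symm
      | some x =>
        rw [hm] at this
        obtain ⟨o, d, fam⟩ := x
        simpa using this.symm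
    cases hfold : t.foldl (minStep (a + 1) (a + r)) none with
    | none => rw [hfold] at hc; simp at hc; rw [hc]
    | some best =>
      rw [hfold] at hc; simp at hc; rw [hc]
      -- second scan agrees
      set M := (PySem.List.max? later (fun x => x)).getD 0 with hM
      have hcongr : (PySem.List.pyRange (r + 1) M 1).any (fun offset =>
            match certified_divisor_class (a + offset) wb with
            | none => false
            | some c => decide (best.2 < c.1))
          = (PySem.List.pyRange (r + 1) M 1).any (fun offset =>
            match pvLook t (a + offset) with
            | none => false
            | some c => decide (best.2 < c)) := by
        congr 1; funext o
        have := cert_eq_look (a + o) wb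
        cases hcc : certified_divisor_class (a + o) wb <;> rw [hcc] at this <;>
          simp at this <;> simp [← ht] at * <;> rw [← this]
      show lockScan a wb best.2 (r + 1) M
        = t.any fun p => decide (a + r + 1 ≤ p.1) && decide (p.1 < a + M) && decide (best.2 < p.2)
      rw [lockScan_eq, hcongr, any_shift a (r + 1) M (fun x =>
            match pvLook t x with
            | none => false
            | some c => decide (best.2 < c))]
      have : a + (r + 1) = a + r + 1 := by ring
      rw [this, any_scan_eq t (table_keys_nodup wb) (a + r + 1) (a + M) best.2]
  · simp
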